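-- pv_equiv track=rewrite | github.com/hoj2atwit/Yapa-Bot-PY | formatter.py | name_unformatter
-- ===== SOURCE A (Python) =====
-- def name_unformatter(name):
--     currentPart = ""
--     formattedName = ""
--     #Iterates through name given
--     for x in range(len(name)):
--       #Checks if spacer Character has been run into
--       if(name[x] == "-"):
--         #Adds 's to formatted name text if the only character in current part is S
--         if(currentPart == "S"):
--           formattedName += "\'s"
--           currentPart = ""
--         else:
--         #Adds currentPart to formattedName and adds space as long as it is not the first word found
--           if(formattedName != ""):
--             formattedName += " ";
--           formattedName += currentPart;
--           currentPart = "";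
--       else:
--         #Adds next character to current part
--         currentPart += name[x]
--         #Capitalizes first letter in new part
--         if(len(currentPart) == 1):
--           currentPart = currentPart.upper();
--           #Adds part to name if at the end of the name.
--         if(x == len(name)-1):
--           if(len(currentPart) != x+1):
--             formattedName += " "
--           formattedName += currentPart
--     return formattedName;
-- ===== SOURCE B (Python) =====
-- def name_unformatter(name):
--     parts = name.split('-')
--     res = ""
--     # every token except the last: flushed by a hyphen
--     for tok in parts[:-1]:
--         cap = tok[:1].upper() + tok[1:]
--         if cap == "S":
--             res += "'s"
--         else:
--             if res != "":
--                 res += " "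
--             res += cap
--     last = parts[-1]
--     # empty last token (trailing hyphen or empty name) is never flushed
--     if last != "":
--         if len(parts) > 1:
--             res += " "
--         res += last[:1].upper() + last[1:]
--     return res
-- ===== Notes on version B (the rewrite author's own statement) =====
-- stated objective: simpler
-- what changed: B splits the name on the hyphen separator once and loops over the token list (uppercasing each token's first character, with A's mid-name S->'s and spacing quirks expressed per token), instead of A's character-by-character indexed scan that maintains a currentPart buffer and a last-index test.
import Mathlib
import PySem

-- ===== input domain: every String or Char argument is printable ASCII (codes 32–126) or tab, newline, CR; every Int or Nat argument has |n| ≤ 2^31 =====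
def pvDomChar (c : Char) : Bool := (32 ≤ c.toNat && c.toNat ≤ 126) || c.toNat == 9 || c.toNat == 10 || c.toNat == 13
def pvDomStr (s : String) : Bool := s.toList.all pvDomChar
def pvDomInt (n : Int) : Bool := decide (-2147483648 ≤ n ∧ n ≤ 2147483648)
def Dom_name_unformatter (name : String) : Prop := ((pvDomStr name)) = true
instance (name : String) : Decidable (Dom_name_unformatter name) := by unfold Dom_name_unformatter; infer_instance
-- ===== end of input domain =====

-- B replaces A's character-by-character scan with a split('-') and a loop over tokens (simpler decomposition).

-- ===== PORT A =====
-- literal transliteration of A's for-loop over x in range(len(name)), state (currentPart, formattedName)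
def nameUnfLoop (cs : List Char) (n x : Nat) (currentPart formattedName : List Char) : List Char :=
  match cs with
  | [] => formattedName
  | c :: rest =>
    if c = '-' then
      if currentPart = ['S'] then
        nameUnfLoop rest n (x + 1) [] (formattedName ++ ['\'', 's'])
      else
        nameUnfLoop rest n (x + 1) []
          ((if formattedName ≠ [] then formattedName ++ [' '] else formattedName) ++ currentPart)
    else
      let cp1 := currentPart ++ [c]
      let cp2 := if cp1.length = 1 then cp1.map Char.toUpper else cp1
      let fn' := if x = n - 1 then
          (if cp2.length ≠ x + 1 then formattedName ++ [' '] else formattedName) ++ cp2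
        else formattedName
      nameUnfLoop rest n (x + 1) cp2 fn'

def name_unformatter (name : String) : String :=
  String.mk (nameUnfLoop name.toList name.toList.length 0 [] [])

-- ===== PORT B =====
-- name.split('-') on char lists (Python split with a one-char separator)
def splitHyphen : List Char → List (List Char)
  | [] => [[]]
  | c :: rest =>
    if c = '-' then [] :: splitHyphen rest
    else
      match splitHyphen rest with
      | t :: ts => (c :: t) :: ts
      | [] => [[c]]

-- tok[:1].upper() + tok[1:]
def capTok : List Char → List Char
  | [] => []
  | c :: r => c.toUpper :: r

-- the body of B's for-loop over parts[:-1]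
def hyphenFlush (res : List Char) (tok : List Char) : List Char :=
  let cap := capTok tok
  if cap = ['S'] then res ++ ['\'', 's']
  else (if res ≠ [] then res ++ [' '] else res) ++ cap

-- B's handling of the final token
def lastFlush (res : List Char) (t : List Char) (many : Bool) : List Char :=
  if t = [] then res
  else (if many then res ++ [' '] else res) ++ capTok t

def name_unformatter_alt (name : String) : String :=
  let parts := splitHyphen name.toList
  let res := parts.dropLast.foldl hyphenFlush []
  String.mk (lastFlush res (parts.getLastD []) (decide (parts.length > 1)))

-- ===== PRECONDITION & SPEC =====
def Spec_name_unformatter (name : String) (out : String) : Prop := out = name_unformatter_alt name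
instance (name : String) (out : String) : Decidable (Spec_name_unformatter name out) := by unfold Spec_name_unformatter; infer_instance

-- ===== CLAIM (what is proved, stated in full; the proofs are below) =====
def Claim_equal_name_unformatter : Prop := ∀ (name : String), Dom_name_unformatter name → Spec_name_unformatter name (name_unformatter name)

-- ===== LEMMAS AND PROOFS =====

-- proof intermediary: A's loop expressed on the token list, carrying the pending part cp and index x
def firstMerge (cp t : List Char) : List Char := if cp = [] then capTok t else cp ++ t

-- hyphen branch of A, with merged part m
def hyphenFlush' (m fn : List Char) : List Char :=
  if m = ['S'] then fn ++ ['\'', 's']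
  else (if fn ≠ [] then fn ++ [' '] else fn) ++ m

def finishB : List (List Char) → List Char → List Char → Nat → List Char
  | [], _, fn, _ => fn
  | [t], cp, fn, x =>
      if t = [] then fn
      else
        let m := firstMerge cp t
        (if m.length ≠ x + t.length then fn ++ [' '] else fn) ++ m
  | t :: t' :: ts, cp, fn, x =>
      finishB (t' :: ts) [] (hyphenFlush' (firstMerge cp t) fn) (x + t.length + 1)

theorem splitHyphen_ne_nil (l : List Char) : splitHyphen l ≠ [] := by
  cases l with
  | nil => simp [splitHyphen]
  | cons c rest =>
    simp only [splitHyphen]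
    split
    · simp
    · cases splitHyphen rest <;> simp

theorem splitHyphen_singleton (l t : List Char) (h : splitHyphen l = [t]) : t = l := by
  induction l generalizing t with
  | nil => simp [splitHyphen] at h; simp [h]
  | cons c rest ih =>
    simp only [splitHyphen] at h
    split at h
    · exact absurd (List.cons_eq_cons.mp h).2 (splitHyphen_ne_nil rest)
    · rcases hs : splitHyphen rest with _ | ⟨t', ts⟩
      · exact absurd hs (splitHyphen_ne_nil rest)
      · rw [hs] at h
        obtain ⟨h1, h2⟩ := List.cons_eq_cons.mp h.symm
        cases ts with
        | cons _ _ => simp at h2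
        | nil => rw [h1, ih t' hs]

theorem firstMerge_nil_right (cp : List Char) : firstMerge cp [] = cp := by
  by_cases h : cp = [] <;> simp [firstMerge, capTok, h]

theorem firstMerge_step (cp : List Char) (c : Char) (t : List Char) :
    firstMerge (firstMerge cp [c]) t = firstMerge cp (c :: t) := by
  by_cases h : cp = [] <;> simp [firstMerge, capTok, h]

theorem capTok_length (t : List Char) : (capTok t).length = t.length := by
  cases t <;> simp [capTok]

theorem hyphenFlush'_capTok (t fn : List Char) :
    hyphenFlush' (capTok t) fn = hyphenFlush fn t := rfl

theorem cp2_eq_firstMerge (cp : List Char) (c : Char) :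
    (if (cp ++ [c]).length = 1 then (cp ++ [c]).map Char.toUpper else cp ++ [c]) =
      firstMerge cp [c] := by
  by_cases h : cp = [] <;> simp [h, firstMerge, capTok]

theorem loop_eq_finishB (cs : List Char) (cp fn : List Char) (x : Nat) :
    nameUnfLoop cs (x + cs.length) x cp fn = finishB (splitHyphen cs) cp fn x := by
  induction cs generalizing cp fn x with
  | nil => simp [nameUnfLoop, splitHyphen, finishB]
  | cons c rest ih =>
    by_cases hc : c = '-'
    · rcases hs : splitHyphen rest with _ | ⟨t, ts⟩
      · exact absurd hs (splitHyphen_ne_nil rest)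
      · have hsplit : splitHyphen (c :: rest) = [] :: t :: ts := by
          simp [splitHyphen, hc, hs]
        rw [hsplit]
        show nameUnfLoop (c :: rest) (x + (rest.length + 1)) x cp fn = _
        rw [show x + (rest.length + 1) = (x + 1) + rest.length by omega]
        simp only [nameUnfLoop, hc]
        by_cases hS : cp = ['S']
        · simp only [hS]
          rw [ih, hs]
          simp [finishB, hyphenFlush', firstMerge_nil_right]
        · simp only [if_neg hS]
          rw [ih, hs]
          simp only [finishB, firstMerge_nil_right, hyphenFlush']
          rw [if_neg hS]
          simp
    · rcases hrest : rest with _ | ⟨c2, rest'⟩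
      · have hsplit : splitHyphen [c] = [[c]] := by simp [splitHyphen, hc]
        rw [hsplit]
        simp only [nameUnfLoop, hc, List.length_cons, List.length_nil]
        rw [if_pos (by omega : x = x + (0 + 1) - 1)]
        simp only [finishB, cp2_eq_firstMerge]
        have hcne : firstMerge cp [c] ≠ [] := by
          by_cases h : cp = [] <;> simp [firstMerge, capTok, h]
        simp [List.length_cons]
      · rw [← hrest]
        have hrne : rest ≠ [] := by rw [hrest]; simp
        rcases hs : splitHyphen rest with _ | ⟨t, ts⟩
        · exact absurd hs (splitHyphen_ne_nil rest)
        · have hsplit : splitHyphen (c :: rest) = (c :: t) :: ts := by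
            simp [splitHyphen, hc, hs]
          rw [hsplit]
          show nameUnfLoop (c :: rest) (x + (rest.length + 1)) x cp fn = _
          simp only [nameUnfLoop, if_neg hc]
          have hxne : ¬ x = x + (rest.length + 1) - 1 := by
            have : 1 ≤ rest.length := by rw [hrest]; simp
            omega
          rw [if_neg hxne]
          have harith : x + (rest.length + 1) = (x + 1) + rest.length := by omega
          rw [harith, ih, hs]
          rcases ts with _ | ⟨t2, ts'⟩
          · -- single remaining token: t = rest ≠ []
            have ht : t = rest := splitHyphen_singleton rest t hs
            have htne : t ≠ [] := ht ▸ hrne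
            simp only [finishB, cp2_eq_firstMerge, firstMerge_step]
            rw [if_neg htne]
            have hMne : firstMerge cp (c :: t) ≠ [] := by
              by_cases h : cp = [] <;> simp [firstMerge, capTok, h]
            simp only [List.length_cons]
            rw [show x + 1 + t.length = x + (t.length + 1) by omega]
            simp
          · simp only [finishB, cp2_eq_firstMerge, firstMerge_step, List.length_cons]
            rw [show x + 1 + t.length + 1 = x + (t.length + 1) + 1 by omega]

theorem finishB_eq_B (toks : List (List Char)) (fn : List Char) (x : Nat)
    (hne : toks ≠ []) (hx : 1 ≤ x) :
    finishB toks [] fn x = lastFlush (toks.dropLast.foldl hyphenFlush fn) (toks.getLastD []) true := by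
  induction toks generalizing fn x with
  | nil => exact absurd rfl hne
  | cons t ts ih =>
    rcases ts with _ | ⟨t2, ts'⟩
    · by_cases ht : t = []
      · simp [finishB, ht, lastFlush]
      · have hd : ([t] : List (List Char)).dropLast = [] := rfl
        have hg : ([t] : List (List Char)).getLastD [] = t := rfl
        rw [hd, hg]
        simp only [finishB, if_neg ht, lastFlush, List.foldl_nil]
        have hm : firstMerge [] t = capTok t := by simp [firstMerge]
        rw [hm, if_pos (by rw [capTok_length]; omega)]
        simp
    · have hstep : finishB (t :: t2 :: ts') [] fn x =
          finishB (t2 :: ts') [] (hyphenFlush fn t) (x + t.length + 1) := by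
        simp only [finishB]
        rw [show firstMerge [] t = capTok t by simp [firstMerge], hyphenFlush'_capTok]
      rw [hstep, ih (hyphenFlush fn t) (x + t.length + 1) (by simp) (by omega)]
      simp [List.dropLast_cons_of_ne_nil]

-- ===== VERDICT (by name: the statement is the Claim_ definition above) =====
theorem name_unformatter_spec : Claim_equal_name_unformatter := by
  intro name _
  unfold Spec_name_unformatter name_unformatter name_unformatter_alt
  have h0 : nameUnfLoop name.toList name.toList.length 0 [] [] =
      finishB (splitHyphen name.toList) [] [] 0 := by
    have := loop_eq_finishB name.toList [] [] 0
    simpa using this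
  rw [h0]
  rcases hs : splitHyphen name.toList with _ | ⟨t, ts⟩
  · exact absurd hs (splitHyphen_ne_nil name.toList)
  · rcases ts with _ | ⟨t2, ts'⟩
    · by_cases ht : t = []
      · simp [finishB, ht, lastFlush]
      · show String.mk (finishB [t] [] [] 0) =
          String.mk (lastFlush (List.foldl hyphenFlush [] ([t] : List (List Char)).dropLast)
            (([t] : List (List Char)).getLastD []) (decide (([t] : List (List Char)).length > 1)))
        have hd : ([t] : List (List Char)).dropLast = [] := rfl
        have hg : ([t] : List (List Char)).getLastD [] = t := rfl
        rw [hd, hg]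
        simp only [finishB, if_neg ht, lastFlush, List.foldl_nil, List.length_cons,
          List.length_nil]
        rw [show firstMerge [] t = capTok t by simp [firstMerge]]
        rw [if_neg (by rw [capTok_length]; omega : ¬ (capTok t).length ≠ 0 + t.length)]
        simp
    · have hstep : finishB (t :: t2 :: ts') [] ([] : List Char) 0 =
          finishB (t2 :: ts') [] (hyphenFlush [] t) (0 + t.length + 1) := by
        simp only [finishB]
        rw [show firstMerge [] t = capTok t by simp [firstMerge], hyphenFlush'_capTok]
      rw [hstep, finishB_eq_B (t2 :: ts') (hyphenFlush [] t) (0 + t.length + 1) (by simp) (by omega)]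
      simp [List.dropLast_cons_of_ne_nil, lastFlush]
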